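-- pv_equiv track=rewrite | github.com/leelooai999-dot/alphaedge | engine/db.py | _convert_placeholders
-- ===== SOURCE A (Python) =====
-- def _convert_placeholders(sql):
--     """Convert ? placeholders to %s for psycopg2."""
--     result = []
--     in_string = False
--     quote_char = None
--     i = 0
--     while i < len(sql):
--         c = sql[i]
--         if in_string:
--             result.append(c)
--             if c == quote_char:
--                 in_string = False
--         elif c in ("'", '"'):
--             in_string = True
--             quote_char = c
--             result.append(c)
--         elif c == '?':
--             result.append('%s')
--         else:
--             result.append(c)
--         i += 1
--     return ''.join(result)
-- ===== SOURCE B (Python) =====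
-- def _convert_placeholders(sql):
--     """Convert ? placeholders to %s for psycopg2."""
--     out = []
--     i = 0
--     n = len(sql)
--     while i < n:
--         c = sql[i]
--         if c == "'" or c == '"':
--             # quoted literal: copy verbatim through the matching close quote
--             j = sql.find(c, i + 1)
--             if j == -1:
--                 out.append(sql[i:])   # unterminated: copy the rest unchanged
--                 break
--             out.append(sql[i:j + 1])
--             i = j + 1
--         else:
--             # plain segment up to the next quote: convert every ?
--             j = i
--             while j < n and sql[j] != "'" and sql[j] != '"':
--                 j += 1
--             out.append(sql[i:j].replace('?', '%s'))
--             i = j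
--     return ''.join(out)
-- ===== Notes on version B (the rewrite author's own statement) =====
-- stated objective: faster
-- what changed: Replaced the per-character in_string/quote_char state machine with a segment-jumping scanner: str.find locates each closing quote so quoted literals are copied in one slice, and plain segments are converted in bulk with str.replace.
import Mathlib
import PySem

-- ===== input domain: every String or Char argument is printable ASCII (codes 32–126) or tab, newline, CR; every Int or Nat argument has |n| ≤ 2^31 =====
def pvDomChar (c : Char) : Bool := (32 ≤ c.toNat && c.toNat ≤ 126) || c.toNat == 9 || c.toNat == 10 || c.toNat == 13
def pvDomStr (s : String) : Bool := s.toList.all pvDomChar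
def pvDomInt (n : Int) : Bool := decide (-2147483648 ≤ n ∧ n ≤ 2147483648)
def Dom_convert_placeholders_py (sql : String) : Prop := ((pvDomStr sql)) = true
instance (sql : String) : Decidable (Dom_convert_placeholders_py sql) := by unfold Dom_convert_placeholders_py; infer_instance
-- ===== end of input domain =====

-- B replaces A's per-character state machine by a segment-jumping scanner (find the close
-- quote / scan the plain run, convert ? only in plain runs); objective: alternative/faster
-- constant factor via bulk find/replace.

-- ===== PORT A =====
-- state: (result as chars — ''.join flattens '%s' to two chars —, in_string, quote_char)
def aStep (st : List Char × Bool × Option Char) (c : Char) : List Char × Bool × Option Char :=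
  let (result, in_string, quote_char) := st
  if in_string then
    let result := result ++ [c]
    if some c == quote_char then (result, false, quote_char) else (result, true, quote_char)
  else if c == '\'' || c == '"' then
    (result ++ [c], true, some c)
  else if c == '?' then
    (result ++ ['%', 's'], false, quote_char)
  else
    (result ++ [c], false, quote_char)

def convert_placeholders_py (sql : String) : String :=
  String.ofList (sql.toList.foldl aStep ([], false, none)).1

-- ===== PORT B =====
def pvIsQuote (c : Char) : Bool := c == '\'' || c == '"'

-- inner while loop of Source B: (plain segment before the next quote, remainder)
def bPlain : List Char → List Char × List Char
  | [] => ([], [])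
  | c :: r => if pvIsQuote c then ([], c :: r) else ((c :: (bPlain r).1), (bPlain r).2)

-- sql.find(c, i+1): chars through the close quote inclusive, and the remainder; none = -1
def bFind (q : Char) : List Char → Option (List Char × List Char)
  | [] => none
  | c :: r =>
    if c == q then some ([c], r)
    else match bFind q r with
      | none => none
      | some (lit, rest) => some (c :: lit, rest)

-- .replace('?', '%s') — exact for a single-char needle: per-char expansion
def bConv (c : Char) : List Char := if c == '?' then ['%', 's'] else [c]
def bReplace (l : List Char) : List Char := l.flatMap bConv

theorem bPlain_rest_le (l : List Char) : (bPlain l).2.length ≤ l.length := by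
  induction l with
  | nil => simp [bPlain]
  | cons c r ih =>
    simp only [bPlain]
    split
    · simp
    · simpa using Nat.le_succ_of_le ih

theorem bFind_rest_lt (q : Char) : ∀ (l lit rest : List Char),
    bFind q l = some (lit, rest) → rest.length < l.length := by
  intro l
  induction l with
  | nil => intro lit rest h; simp [bFind] at h
  | cons c r ih =>
    intro lit rest h
    simp only [bFind] at h
    split at h
    · cases h; simp
    · cases hf : bFind q r with
      | none => rw [hf] at h; cases h
      | some p =>
        rw [hf] at h
        cases p with
        | mk l2 r2 =>
          cases h
          exact Nat.lt_succ_of_lt (ih l2 rest hf)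

-- outer while loop of Source B
def bLoop : List Char → List Char
  | [] => []
  | c :: rest =>
    if pvIsQuote c then
      match hf : bFind c rest with
      | none => c :: rest
      | some (lit, rest') => (c :: lit) ++ bLoop rest'
    else
      bReplace (bPlain (c :: rest)).1 ++ bLoop (bPlain (c :: rest)).2
termination_by l => l.length
decreasing_by
  · exact Nat.lt_succ_of_lt (bFind_rest_lt _ _ _ _ hf)
  · simp only [bPlain]
    split
    · simp_all
    · exact Nat.lt_succ_of_le (bPlain_rest_le rest)

def convert_placeholders_py_alt (sql : String) : String :=
  String.ofList (bLoop sql.toList)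

-- ===== PRECONDITION & SPEC =====
def Spec_convert_placeholders_py (sql : String) (out : String) : Prop := out = convert_placeholders_py_alt sql
instance (sql : String) (out : String) : Decidable (Spec_convert_placeholders_py sql out) := by unfold Spec_convert_placeholders_py; infer_instance

-- ===== CLAIM (what is proved, stated in full; the proofs are below) =====
def Claim_equal_convert_placeholders_py : Prop := ∀ (sql : String), Dom_convert_placeholders_py sql → Spec_convert_placeholders_py sql (convert_placeholders_py sql)

-- ===== LEMMAS AND PROOFS =====

theorem aStep_false (res : List Char) (q : Option Char) (c : Char) :
    aStep (res, false, q) c =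
      if pvIsQuote c then (res ++ [c], true, some c)
      else if c == '?' then (res ++ ['%', 's'], false, q)
      else (res ++ [c], false, q) := by
  simp [aStep, pvIsQuote]

theorem aStep_true (res : List Char) (qc : Char) (c : Char) :
    aStep (res, true, some qc) c =
      if c == qc then (res ++ [c], false, some qc)
      else (res ++ [c], true, some qc) := by
  by_cases h : c = qc <;> simp [aStep, h]

theorem bLoop_glue (r : List Char) :
    bReplace (bPlain r).1 ++ bLoop (bPlain r).2 = bLoop r := by
  cases r with
  | nil => simp [bPlain, bReplace, bLoop]
  | cons c t =>
    by_cases hq : pvIsQuote c = true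
    · simp [bPlain, hq, bReplace]
    · have hq' : pvIsQuote c = false := by simpa using hq
      rw [bLoop, if_neg hq]

theorem bLoop_cons_nonquote (c : Char) (r : List Char) (hq : pvIsQuote c = false) :
    bLoop (c :: r) = bConv c ++ bLoop r := by
  rw [bLoop, if_neg (by simp [hq])]
  simp only [bPlain, hq, Bool.false_eq_true, if_false, bReplace, List.flatMap_cons]
  rw [List.append_assoc, ← bReplace, bLoop_glue]

theorem key (l : List Char) :
    (∀ res q, (l.foldl aStep (res, false, q)).1 = res ++ bLoop l) ∧
    (∀ res qc, (l.foldl aStep (res, true, some qc)).1 =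
      res ++ (match bFind qc l with
              | none => l
              | some (lit, r) => lit ++ bLoop r)) := by
  induction l with
  | nil => simp [bLoop, bFind]
  | cons c r ih =>
    obtain ⟨P, Q⟩ := ih
    constructor
    · intro res q
      rw [List.foldl_cons, aStep_false]
      by_cases hq : pvIsQuote c = true
      · rw [if_pos hq, Q, bLoop, if_pos hq]
        cases hf : bFind c r with
        | none => simp
        | some p => cases p; simp
      · have hq' : pvIsQuote c = false := by simpa using hq
        rw [if_neg hq]
        by_cases h7 : c = '?'
        · subst h7
          rw [if_pos (by simp), P, bLoop_cons_nonquote _ _ hq']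
          simp [bConv]
        · rw [if_neg (by simp [h7]), P, bLoop_cons_nonquote _ _ hq']
          simp [bConv, h7]
    · intro res qc
      rw [List.foldl_cons, aStep_true]
      by_cases he : c = qc
      · subst he
        rw [if_pos (by simp), P, bFind, if_pos (by simp)]
        simp
      · rw [if_neg (by simp [he]), Q, bFind, if_neg (by simp [he])]
        cases hf : bFind qc r with
        | none => simp
        | some p => cases p; simp

-- ===== VERDICT (by name: the statement is the Claim_ definition above) =====
theorem convert_placeholders_py_spec : Claim_equal_convert_placeholders_py := by
  intro sql _
  unfold Spec_convert_placeholders_py convert_placeholders_py convert_placeholders_py_alt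
  rw [(key sql.toList).1 [] none]
  rfl
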